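-- pv_equiv track=rewrite | github.com/bxparks/AceTimeTools | src/acetimetools/generator/gogenerator.py | _render_offsets
-- ===== SOURCE A (Python) =====
-- from typing import Iterable
--
-- def _render_offsets(offsets: Iterable[int], prefix: str = '\t') -> str:
--     """Return a comma-separated list integers as a string suitable for Golang,
--     with a newline added every 10 elements for readability. The logic to
--     correctly handle trailing commas, spaces, and newlines properly was trickier
--     than I thought it would be.
--     """
--     items_per_line = 10
--     count = 0
--     s = ''
--     for n in offsets:
--         if count == 0:
--             s += f'{prefix}{n}'
--         elif count % items_per_line == 0:
--             s += f',\n{prefix}{n}'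
--         else:
--             s += f', {n}'
--         count += 1
--
--     # Add terminating delimiters
--     if count == 0:
--         pass
--     else:
--         s += ','
--     return s
-- ===== SOURCE B (Python) =====
-- def _render_offsets(offsets, prefix='\t'):
--     """Chunk-first re-implementation: stringify once, slice into groups of 10,
--     join each group with ', ', join the groups with ',\\n', append trailing comma."""
--     strs = [str(n) for n in offsets]
--     lines = [prefix + ', '.join(strs[i:i + 10]) for i in range(0, len(strs), 10)]
--     if not lines:
--         return ''
--     return ',\n'.join(lines) + ','
-- ===== Notes on version B (the rewrite author's own statement) =====
-- stated objective: alternative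
-- what changed: Replaced A's single flat loop with a (count, s) accumulator and a three-way count/count%10 branch by a chunk-first decomposition: slice the list into groups of 10, render each group as prefix + ', '.join(...), join the groups with ', ', and append the trailing comma once at the end.
import Mathlib
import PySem

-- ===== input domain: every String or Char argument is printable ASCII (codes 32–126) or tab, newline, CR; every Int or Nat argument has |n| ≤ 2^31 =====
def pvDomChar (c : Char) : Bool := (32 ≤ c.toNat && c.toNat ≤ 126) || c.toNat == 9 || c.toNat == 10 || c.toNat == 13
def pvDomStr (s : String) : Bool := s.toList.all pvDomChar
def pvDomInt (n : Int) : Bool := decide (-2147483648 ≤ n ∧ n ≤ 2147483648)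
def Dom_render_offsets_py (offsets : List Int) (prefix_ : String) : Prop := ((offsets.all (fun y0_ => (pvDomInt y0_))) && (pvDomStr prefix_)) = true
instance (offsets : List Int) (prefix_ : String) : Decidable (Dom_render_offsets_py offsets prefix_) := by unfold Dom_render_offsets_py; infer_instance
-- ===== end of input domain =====

-- B replaces A's flat counter-and-branch loop by a chunk-first decomposition (slice into
-- groups of 10, join each group, join the groups); same cost, different structure ("alternative").

-- ===== PORT A =====
-- literal transliteration of A's single loop over `offsets` with state (count, s)
def render_offsets_py (offsets : List Int) (prefix_ : String) : String :=
  let st := offsets.foldl (fun (st : Nat × String) n =>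
      let s :=
        if st.1 = 0 then st.2 ++ prefix_ ++ PySem.Int.toStr n
        else if st.1 % 10 = 0 then st.2 ++ ",\n" ++ prefix_ ++ PySem.Int.toStr n
        else st.2 ++ ", " ++ PySem.Int.toStr n
      (st.1 + 1, s)) (0, "")
  if st.1 = 0 then st.2 else st.2 ++ ","

-- ===== PORT B =====
-- the `for i in range(0, len(strs), 10)` slicing comprehension of Source B: each step takes
-- the next slice strs[i:i+10]; transcribed as the equivalent structural recursion
def pvChunksS (l : List String) : List (List String) :=
  if l = [] then [] else l.take 10 :: pvChunksS (l.drop 10)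
termination_by l.length
decreasing_by rcases l with _ | ⟨a, t⟩ <;> simp_all [List.length_drop]

def render_offsets_py_alt (offsets : List Int) (prefix_ : String) : String :=
  let strs := offsets.map PySem.Int.toStr
  let lines := (pvChunksS strs).map (fun ch => prefix_ ++ PySem.Str.join ", " ch)
  if lines = [] then "" else PySem.Str.join ",\n" lines ++ ","

-- ===== PRECONDITION & SPEC =====
def Spec_render_offsets_py (offsets : List Int) (prefix_ : String) (out : String) : Prop := out = render_offsets_py_alt offsets prefix_
instance (offsets : List Int) (prefix_ : String) (out : String) : Decidable (Spec_render_offsets_py offsets prefix_ out) := by unfold Spec_render_offsets_py; infer_instance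

-- ===== CLAIM (what is proved, stated in full; the proofs are below) =====
def Claim_equal_render_offsets_py : Prop := ∀ (offsets : List Int) (prefix_ : String), Dom_render_offsets_py offsets prefix_ → Spec_render_offsets_py offsets prefix_ (render_offsets_py offsets prefix_)

-- ===== LEMMAS AND PROOFS =====

-- proof-side chunker over the raw Int list (pvChunksS after mapping str)
def pvChunks (l : List Int) : List (List Int) :=
  if l = [] then [] else l.take 10 :: pvChunks (l.drop 10)
termination_by l.length
decreasing_by rcases l with _ | ⟨a, t⟩ <;> simp_all [List.length_drop]

theorem chunksS_map (k : Nat) : ∀ l : List Int, l.length ≤ k →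
    pvChunksS (l.map PySem.Int.toStr) = (pvChunks l).map (List.map PySem.Int.toStr) := by
  induction k with
  | zero => intro l hl
            rw [List.length_eq_zero_iff.mp (Nat.le_zero.mp hl)]
            rw [pvChunksS.eq_def, pvChunks.eq_def]; simp
  | succ k ih =>
      intro l hl
      rcases l with _ | ⟨h, t⟩
      · rw [pvChunksS.eq_def, pvChunks.eq_def]; simp
      · rw [pvChunksS.eq_def, pvChunks.eq_def,
          if_neg (by simp : ¬((h :: t).map PySem.Int.toStr = [])),
          if_neg (List.cons_ne_nil h t),
          ← List.map_take, ← List.map_drop,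
          ih ((h :: t).drop 10)
            (by simp only [List.length_drop, List.length_cons] at hl ⊢; omega)]
        simp

-- the string A's loop appends for the element at position c
def pieceA (p : String) (c : Nat) (n : Int) : String :=
  if c = 0 then p ++ PySem.Int.toStr n
  else if c % 10 = 0 then ",\n" ++ p ++ PySem.Int.toStr n
  else ", " ++ PySem.Int.toStr n

-- the suffix A's loop appends when started at counter value c
def loopA (p : String) : List Int → Nat → String
  | [], _ => ""
  | n :: t, c => pieceA p c n ++ loopA p t (c + 1)

-- within-chunk rendering: ", n1, n2, …"
def innerS : List Int → String
  | [] => ""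
  | n :: t => ", " ++ PySem.Int.toStr n ++ innerS t

theorem foldl_eq_loopA (p : String) (l : List Int) (c : Nat) (s : String) :
    l.foldl (fun (st : Nat × String) n =>
      let s :=
        if st.1 = 0 then st.2 ++ p ++ PySem.Int.toStr n
        else if st.1 % 10 = 0 then st.2 ++ ",\n" ++ p ++ PySem.Int.toStr n
        else st.2 ++ ", " ++ PySem.Int.toStr n
      (st.1 + 1, s)) (c, s) = (c + l.length, s ++ loopA p l c) := by
  induction l generalizing c s with
  | nil => simp [loopA]
  | cons n t ih =>
      simp only [List.foldl_cons]
      rw [ih]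
      simp only [loopA, pieceA, Prod.mk.injEq]
      split_ifs <;> simp [String.append_assoc] <;> omega

theorem loopA_append (p : String) (a b : List Int) (c : Nat) :
    loopA p (a ++ b) c = loopA p a c ++ loopA p b (c + a.length) := by
  induction a generalizing c with
  | nil => simp [loopA]
  | cons n t ih =>
      simp [loopA, ih, String.append_assoc]
      ring_nf

theorem loopA_inner (p : String) (l : List Int) (c : Nat)
    (h1 : c % 10 ≠ 0) (h2 : l.length + c % 10 ≤ 10) :
    loopA p l c = innerS l := by
  induction l generalizing c with
  | nil => simp [loopA, innerS]
  | cons n t ih =>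
      have hc0 : c ≠ 0 := by omega
      simp only [loopA, pieceA, if_neg hc0, if_neg h1, innerS, String.append_assoc]
      congr 2
      rcases t with _ | ⟨m, t⟩
      · simp [loopA, innerS]
      · simp only [List.length_cons] at h2
        exact ih (c + 1) (by omega) (by simp only [List.length_cons]; omega)

-- ', '.join(str(n) for n in h::t) = str(h) ++ innerS t
theorem join_comma (h : Int) (t : List Int) :
    PySem.Str.join ", " ((h :: t).map PySem.Int.toStr) =
      PySem.Int.toStr h ++ innerS t := by
  induction t generalizing h with
  | nil =>
      apply String.toList_inj.mp
      simp [PySem.Str.toList_join, PySem.Chars.join_singleton, innerS]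
  | cons m t ih =>
      apply String.toList_inj.mp
      have hm := congrArg String.toList (ih m)
      simp only [List.map_cons, PySem.Str.toList_join, String.toList_append] at hm ⊢
      rw [PySem.Chars.join_cons_cons]
      simp [innerS, String.toList_append, List.append_assoc]
      simpa [PySem.Int.toList_toStr, Function.comp, List.map_map] using hm

theorem join_cons (sep x : String) (xs : List String) :
    PySem.Str.join sep (x :: xs) =
      x ++ (if xs = [] then "" else sep ++ PySem.Str.join sep xs) := by
  apply String.toList_inj.mp
  rcases xs with _ | ⟨y, ys⟩
  · simp [PySem.Str.toList_join, PySem.Chars.join_singleton]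
  · simp [PySem.Str.toList_join, PySem.Chars.join_cons_cons, String.toList_append]

-- one line of B: prefix + ', '.join(chunk)
def lineB (p : String) (ch : List Int) : String :=
  p ++ PySem.Str.join ", " (ch.map PySem.Int.toStr)

theorem pvChunks_ne_nil (l : List Int) (h : l ≠ []) : pvChunks l ≠ [] := by
  rw [pvChunks.eq_def]; simp [h]

-- main characterisation of A's loop at a chunk boundary
theorem loopA_main (p : String) (k : Nat) :
    ∀ l : List Int, l.length ≤ k → l ≠ [] → ∀ c : Nat, c % 10 = 0 →
    loopA p l c = (if c = 0 then "" else ",\n") ++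
      PySem.Str.join ",\n" ((pvChunks l).map (lineB p)) := by
  induction k with
  | zero => intro l hl hne; cases l <;> simp_all
  | succ k ih =>
      intro l hl hne c hc
      rcases l with _ | ⟨h, t⟩
      · exact absurd rfl hne
      have hchunks : pvChunks (h :: t) = (h :: t).take 10 :: pvChunks ((h :: t).drop 10) := by
        rw [pvChunks.eq_def]; simp
      have htake : (h :: t).take 10 = h :: t.take 9 := by simp
      have hhead : loopA p (h :: t.take 9) c =
          (if c = 0 then "" else ",\n") ++ lineB p ((h :: t).take 10) := by
        simp only [loopA, pieceA, if_pos hc]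
        have hin : loopA p (t.take 9) (c + 1) = innerS (t.take 9) := by
          rcases Nat.eq_zero_or_pos (t.take 9).length with h9 | _
          · simp [List.length_eq_zero_iff.mp h9, loopA, innerS]
          · exact loopA_inner p _ _ (by omega) (by have := List.length_take_le 9 t; omega)
        rw [hin, htake, lineB, join_comma]
        split_ifs <;> simp [String.append_assoc]
      by_cases hd : (h :: t).drop 10 = []
      · -- single chunk
        have : t.take 9 = t := by
          have : t.length ≤ 9 := by
            have := congrArg List.length hd; simp at this; omega
          simp [List.take_of_length_le this]
        rw [this] at hhead
        have htake' : (h :: t).take 10 = h :: t := by rw [htake, this]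
        rw [htake'] at hhead
        rw [hchunks, hd, pvChunks.eq_def, if_pos rfl]
        simp only [List.map_cons, List.map_nil]
        rw [join_cons]
        simp only [reduceIte, String.append_empty, htake']
        exact hhead
      · -- more than one chunk
        have hlen10 : 10 ≤ (h :: t).length := by
          by_contra hlt
          exact hd (by simp [List.drop_of_length_le (by omega : (h :: t).length ≤ 10)])
        have hsplit : (h :: t) = (h :: t).take 10 ++ (h :: t).drop 10 :=
          (List.take_append_drop 10 (h :: t)).symm
        have hlentake : ((h :: t).take 10).length = 10 := by
          simp only [List.length_cons] at hlen10
          simp only [List.length_take, List.length_cons]; omega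
        have hl' : t.length + 1 ≤ k + 1 := by simpa using hl
        have hrec := ih ((h :: t).drop 10)
          (by simp only [List.length_drop, List.length_cons]; omega) hd (c + 10) (by omega)
        calc loopA p (h :: t) c
            = loopA p ((h :: t).take 10) c ++ loopA p ((h :: t).drop 10) (c + 10) := by
              conv_lhs => rw [hsplit]
              rw [loopA_append, hlentake]
          _ = ((if c = 0 then "" else ",\n") ++ lineB p ((h :: t).take 10)) ++
              (",\n" ++ PySem.Str.join ",\n" ((pvChunks ((h :: t).drop 10)).map (lineB p))) := by
              rw [htake, hhead, hrec]; simp [String.append_assoc]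
          _ = (if c = 0 then "" else ",\n") ++
              PySem.Str.join ",\n" ((pvChunks (h :: t)).map (lineB p)) := by
              rw [hchunks]
              simp only [List.map_cons]
              rw [join_cons]
              have hch : pvChunks ((h :: t).drop 10) ≠ [] := pvChunks_ne_nil _ hd
              have hch9 : pvChunks (List.drop 9 t) ≠ [] := by simpa using hch
              simp [hch9, String.append_assoc]

-- ===== VERDICT (by name: the statement is the Claim_ definition above) =====
theorem render_offsets_py_spec : Claim_equal_render_offsets_py := by
  intro offsets prefix_ _
  unfold Spec_render_offsets_py render_offsets_py render_offsets_py_alt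
  dsimp only
  rcases offsets with _ | ⟨h, t⟩
  · rw [pvChunksS.eq_def]; simp
  · rw [foldl_eq_loopA]
    have hne : (h :: t) ≠ [] := by simp
    have hmain := loopA_main prefix_ (h :: t).length (h :: t) le_rfl hne 0 (by omega)
    simp only [reduceIte] at hmain
    rw [hmain]
    have hch : pvChunks (h :: t) ≠ [] := pvChunks_ne_nil _ hne
    rw [chunksS_map (h :: t).length (h :: t) le_rfl]
    simp only [String.empty_append, List.map_map]
    rw [if_neg (by simp : ¬(0 + (h :: t).length = 0)),
      if_neg (by simp [hch] : ¬(((pvChunks (h :: t)).map ((fun ch => prefix_ ++ PySem.Str.join ", " ch) ∘ List.map PySem.Int.toStr)) = []))]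
    rfl
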